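-- pv_equiv track=rewrite | github.com/Jawad-Ahmed1/timetable_Schedular_GA | src/ga_timetable.py | get_lecture_blocks
-- ===== SOURCE A (Python) =====
-- def get_lecture_blocks(hours):
--     blocks = []
--     if hours <= 0:
--         return blocks
--     while hours > 0:
--         if hours >= 3:
--             blocks.append(3)
--             hours -= 3
--         elif hours >= 2:
--             blocks.append(2)
--             hours -= 2
--         else:
--             blocks.append(1)
--             hours -= 1
--     return blocks
-- ===== SOURCE B (Python) =====
-- def get_lecture_blocks(hours):
--     if hours <= 0:
--         return []
--     k, r = divmod(hours, 3)
--     return [3] * k + ([r] if r else [])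
-- ===== Notes on version B (the rewrite author's own statement) =====
-- stated objective: simpler
-- what changed: Replaces the iterative subtract-3/2/1 while-loop by a closed form: divmod(hours,3) gives the count of 3-blocks and the final remainder block.
import Mathlib
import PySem

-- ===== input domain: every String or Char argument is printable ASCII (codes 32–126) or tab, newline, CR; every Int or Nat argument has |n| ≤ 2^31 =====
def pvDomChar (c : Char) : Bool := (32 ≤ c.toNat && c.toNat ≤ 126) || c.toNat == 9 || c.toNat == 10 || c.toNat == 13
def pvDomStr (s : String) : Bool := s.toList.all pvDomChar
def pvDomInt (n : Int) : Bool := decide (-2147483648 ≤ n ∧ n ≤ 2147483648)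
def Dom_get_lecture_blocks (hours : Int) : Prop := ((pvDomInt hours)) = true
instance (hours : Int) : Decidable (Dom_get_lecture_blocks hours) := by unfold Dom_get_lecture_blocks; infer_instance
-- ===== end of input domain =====

-- B replaces A's iterative subtract-3/2/1 loop by a closed form via divmod(hours, 3) (simpler).


-- ===== PORT A =====
-- the while-loop: appends 3, 2 or 1 and subtracts it, until hours ≤ 0
def pvALoop (hours : Int) : List Int :=
  if h : hours > 0 then
    if hours ≥ 3 then 3 :: pvALoop (hours - 3)
    else if hours ≥ 2 then 2 :: pvALoop (hours - 2)
    else 1 :: pvALoop (hours - 1)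
  else []
termination_by hours.toNat
decreasing_by all_goals omega

def get_lecture_blocks (hours : Int) : List Int :=
  if hours ≤ 0 then [] else pvALoop hours

-- ===== PORT B =====
def get_lecture_blocks_alt (hours : Int) : List Int :=
  if hours ≤ 0 then []
  else
    let k := PySem.Int.floordiv hours 3
    let r := PySem.Int.mod hours 3
    List.replicate k.toNat 3 ++ (if r ≠ 0 then [r] else [])

-- ===== PRECONDITION & SPEC =====
def Spec_get_lecture_blocks (hours : Int) (out : List Int) : Prop := out = get_lecture_blocks_alt hours
instance (hours : Int) (out : List Int) : Decidable (Spec_get_lecture_blocks hours out) := by unfold Spec_get_lecture_blocks; infer_instance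

-- ===== CLAIM (what is proved, stated in full; the proofs are below) =====
def Claim_equal_get_lecture_blocks : Prop := ∀ (hours : Int), Dom_get_lecture_blocks hours → Spec_get_lecture_blocks hours (get_lecture_blocks hours)

-- ===== LEMMAS AND PROOFS =====

-- closed form of the loop for positive hours, by strong induction on hours.toNat
theorem pvALoop_closed (hours : Int) (hpos : 0 < hours) :
    pvALoop hours =
      List.replicate (PySem.Int.floordiv hours 3).toNat 3 ++
        (if PySem.Int.mod hours 3 ≠ 0 then [PySem.Int.mod hours 3] else []) := by
  induction hours using pvALoop.induct with
  | case1 h hgt hge3 ih =>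
    rw [pvALoop, dif_pos hgt, if_pos hge3]
    by_cases h3 : 0 < h - 3
    · rw [ih h3]
      have hm : PySem.Int.mod h 3 = PySem.Int.mod (h - 3) 3 := by
        simp only [PySem.Int.mod, Int.fmod_eq_emod]; omega
      have ht : (PySem.Int.floordiv h 3).toNat = (PySem.Int.floordiv (h - 3) 3).toNat + 1 := by
        simp only [PySem.Int.floordiv, Int.fdiv_eq_ediv]; omega
      rw [hm, ht, List.replicate_succ]
      simp
    · -- h = 3
      have h3' : h = 3 := by omega
      subst h3'
      rw [pvALoop]
      decide
  | case2 h hgt hlt3 hge2 ih =>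
    -- h = 2
    have : h = 2 := by omega
    subst this
    rw [pvALoop, dif_pos hgt, if_neg hlt3, if_pos hge2, pvALoop]
    decide
  | case3 h hgt hlt3 hlt2 ih =>
    -- h = 1
    have : h = 1 := by omega
    subst this
    rw [pvALoop, dif_pos hgt, if_neg hlt3, if_neg hlt2, pvALoop]
    decide
  | case4 h hne =>
    omega

-- ===== VERDICT (by name: the statement is the Claim_ definition above) =====
theorem get_lecture_blocks_spec : Claim_equal_get_lecture_blocks := by
  intro hours _
  unfold Spec_get_lecture_blocks get_lecture_blocks get_lecture_blocks_alt
  by_cases hle : hours ≤ 0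
  · simp [hle]
  · simp only [if_neg hle]
    exact pvALoop_closed hours (by omega)
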